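-- pv_equiv track=rewrite | github.com/tykim9999/qmd | finetune/dataset/schema.py | parse_output_text
-- ===== SOURCE A (Python) =====
-- def parse_output_text(text: str) -> list[list[str]]:
--     """Parse prefixed output text into list pairs.
--
--     Returns: [["hyde", "..."], ["lex", "..."], ...]
--     """
--     items: list[list[str]] = []
--     for raw_line in text.strip().split("\n"):
--         line = raw_line.strip()
--         if not line:
--             continue
--         if line.startswith("lex:"):
--             items.append(["lex", line[4:].strip()])
--         elif line.startswith("vec:"):
--             items.append(["vec", line[4:].strip()])
--         elif line.startswith("hyde:"):
--             items.append(["hyde", line[5:].strip()])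
--     return items
-- ===== SOURCE B (Python) =====
-- def parse_output_text(text: str) -> list[list[str]]:
--     items: list[list[str]] = []
--     for raw_line in text.strip().split("\n"):
--         line = raw_line.strip()
--         if not line:
--             continue
--         label, sep, rest = line.partition(":")
--         if sep == ":" and label in ("lex", "vec", "hyde"):
--             items.append([label, rest.strip()])
--     return items
-- ===== Notes on version B (the rewrite author's own statement) =====
-- stated objective: idiomatic
-- what changed: Replaces the three fixed startswith-plus-offset-slice branches (hardcoded lengths 4 and 5) with a single str.partition on the colon followed by one membership test of the label, so no prefix lengths appear at all.
import Mathlib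
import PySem

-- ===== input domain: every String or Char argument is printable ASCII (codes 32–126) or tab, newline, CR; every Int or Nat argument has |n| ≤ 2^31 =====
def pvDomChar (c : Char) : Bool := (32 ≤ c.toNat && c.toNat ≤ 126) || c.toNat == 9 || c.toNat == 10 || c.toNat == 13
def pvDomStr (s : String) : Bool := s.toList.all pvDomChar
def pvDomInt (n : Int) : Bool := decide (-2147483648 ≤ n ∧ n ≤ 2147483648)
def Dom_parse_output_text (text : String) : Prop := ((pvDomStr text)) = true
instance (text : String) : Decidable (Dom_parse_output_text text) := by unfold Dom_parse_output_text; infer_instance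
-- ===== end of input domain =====

-- B replaces the three startswith+offset-slice branches with one partition on the colon plus a label membership test (idiomatic; same cost).

-- ===== PORT A =====
def parse_output_text (text : String) : List (List String) :=
  ((PySem.Str.split? (PySem.Str.strip text) "\n").getD []).foldl (fun items raw_line =>
    let line := PySem.Str.strip raw_line
    if line = "" then items
    else if PySem.Str.startswith line "lex:" then
      items ++ [["lex", PySem.Str.strip (PySem.Str.slice line (some 4) none)]]
    else if PySem.Str.startswith line "vec:" then
      items ++ [["vec", PySem.Str.strip (PySem.Str.slice line (some 4) none)]]
    else if PySem.Str.startswith line "hyde:" then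
      items ++ [["hyde", PySem.Str.strip (PySem.Str.slice line (some 5) none)]]
    else items) []

-- ===== PORT B =====
-- hand port of str.partition(":") for the one-char separator, exact:
-- (text before the first ':', found-flag, text after); no ':' → (whole line, false, "").
def partitionColon : List Char → List Char × Bool × List Char
  | [] => ([], false, [])
  | c :: cs =>
    if c = ':' then ([], true, cs)
    else
      let r := partitionColon cs
      (c :: r.1, r.2.1, r.2.2)

def parse_output_text_alt (text : String) : List (List String) :=
  ((PySem.Str.split? (PySem.Str.strip text) "\n").getD []).foldl (fun items raw_line =>
    let line := PySem.Str.strip raw_line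
    if line = "" then items
    else
      let p := partitionColon line.toList
      if p.2.1 && (["lex", "vec", "hyde"] : List String).contains (String.ofList p.1) then
        items ++ [[String.ofList p.1, PySem.Str.strip (String.ofList p.2.2)]]
      else items) []

-- ===== PRECONDITION & SPEC =====
def Spec_parse_output_text (text : String) (out : List (List String)) : Prop := out = parse_output_text_alt text
instance (text : String) (out : List (List String)) : Decidable (Spec_parse_output_text text out) := by unfold Spec_parse_output_text; infer_instance

-- ===== CLAIM (what is proved, stated in full; the proofs are below) =====
def Claim_equal_parse_output_text : Prop := ∀ (text : String), Dom_parse_output_text text → Spec_parse_output_text text (parse_output_text text)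

-- ===== LEMMAS AND PROOFS =====

theorem partitionColon_true : ∀ (l b a : List Char), partitionColon l = (b, true, a) → l = b ++ ':' :: a := by
  intro l
  induction l with
  | nil => intro b a h; simp [partitionColon] at h
  | cons c cs ih =>
    intro b a h
    by_cases hc : c = ':'
    · simp only [partitionColon, if_pos hc, Prod.mk.injEq] at h
      obtain ⟨hb, -, ha⟩ := h
      simp [hc, ← hb, ← ha]
    · rcases hx : partitionColon cs with ⟨b', f', a'⟩
      simp only [partitionColon, if_neg hc, hx, Prod.mk.injEq] at h
      obtain ⟨hb, hf, ha⟩ := h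
      have hcs := ih b' a' (by rw [hx, hf, ha])
      simp [← hb, hcs, ha]

theorem foldl_ext {α β : Type} (f g : α → β → α) (h : ∀ a b, f a b = g a b) :
    ∀ (l : List β) (i : α), l.foldl f i = l.foldl g i := by
  intro l
  induction l with
  | nil => intro i; rfl
  | cons x xs ih => intro i; simp only [List.foldl]; rw [h]; exact ih _

theorem mk_eq_of_toList {l : List Char} {s : String} (h : String.ofList l = s) : l = s.toList := by
  have := congrArg String.toList h
  simpa [String.toList_ofList] using this

theorem line_eq (items : List (List String)) (line : String) :
    (if line = "" then items
     else if PySem.Str.startswith line "lex:" then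
       items ++ [["lex", PySem.Str.strip (PySem.Str.slice line (some 4) none)]]
     else if PySem.Str.startswith line "vec:" then
       items ++ [["vec", PySem.Str.strip (PySem.Str.slice line (some 4) none)]]
     else if PySem.Str.startswith line "hyde:" then
       items ++ [["hyde", PySem.Str.strip (PySem.Str.slice line (some 5) none)]]
     else items)
    =
    (if line = "" then items
     else
       let p := partitionColon line.toList
       if p.2.1 && (["lex", "vec", "hyde"] : List String).contains (String.ofList p.1) then
         items ++ [[String.ofList p.1, PySem.Str.strip (String.ofList p.2.2)]]
       else items) := by
  by_cases h0 : line = ""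
  · simp [h0]
  simp only [if_neg h0]
  by_cases h1 : PySem.Str.startswith line "lex:" = true
  · have hpre : "lex:".toList <+: line.toList := by
      rw [PySem.Str.startswith_eq, PySem.Chars.startswith_iff] at h1; exact h1
    obtain ⟨t, ht⟩ := hpre
    have hl : line.toList = 'l' :: 'e' :: 'x' :: ':' :: t := by rw [← ht]; rfl
    have hp : partitionColon line.toList = (['l', 'e', 'x'], true, t) := by
      rw [hl]; simp [partitionColon]
    have hs : PySem.Str.slice line (some 4) none = String.ofList t := by
      apply String.toList_inj.mp
      simp [PySem.List.slice_from (a := 4) _ (by norm_num), hl]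
    rw [if_pos h1]
    simp only [hp]
    rw [if_pos (by decide)]
    simp [hs]
  by_cases h2 : PySem.Str.startswith line "vec:" = true
  · have hpre : "vec:".toList <+: line.toList := by
      rw [PySem.Str.startswith_eq, PySem.Chars.startswith_iff] at h2; exact h2
    obtain ⟨t, ht⟩ := hpre
    have hl : line.toList = 'v' :: 'e' :: 'c' :: ':' :: t := by rw [← ht]; rfl
    have hp : partitionColon line.toList = (['v', 'e', 'c'], true, t) := by
      rw [hl]; simp [partitionColon]
    have hs : PySem.Str.slice line (some 4) none = String.ofList t := by
      apply String.toList_inj.mp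
      simp [PySem.List.slice_from (a := 4) _ (by norm_num), hl]
    rw [if_neg (by simpa using h1), if_pos h2]
    simp only [hp]
    rw [if_pos (by decide)]
    simp [hs]
  by_cases h3 : PySem.Str.startswith line "hyde:" = true
  · have hpre : "hyde:".toList <+: line.toList := by
      rw [PySem.Str.startswith_eq, PySem.Chars.startswith_iff] at h3; exact h3
    obtain ⟨t, ht⟩ := hpre
    have hl : line.toList = 'h' :: 'y' :: 'd' :: 'e' :: ':' :: t := by rw [← ht]; rfl
    have hp : partitionColon line.toList = (['h', 'y', 'd', 'e'], true, t) := by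
      rw [hl]; simp [partitionColon]
    have hs : PySem.Str.slice line (some 5) none = String.ofList t := by
      apply String.toList_inj.mp
      simp [PySem.List.slice_from (a := 5) _ (by norm_num), hl]
    rw [if_neg (by simpa using h1), if_neg (by simpa using h2), if_pos h3]
    simp only [hp]
    rw [if_pos (by decide)]
    simp [hs]
  -- no recognised prefix: A skips; show B's condition is false
  rw [if_neg (by simpa using h1), if_neg (by simpa using h2), if_neg (by simpa using h3)]
  rcases hx : partitionColon line.toList with ⟨b, f, a⟩
  cases f with
  | false => simp
  | true =>
    by_cases hc : (["lex", "vec", "hyde"] : List String).contains (String.ofList b) = true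
    · exfalso
      have hl := partitionColon_true _ _ _ hx
      have hmem : String.ofList b = "lex" ∨ String.ofList b = "vec" ∨ String.ofList b = "hyde" := by
        simpa using hc
      rcases hmem with h | h | h
      · exact h1 (by
          rw [PySem.Str.startswith_eq, PySem.Chars.startswith_iff]
          exact ⟨a, by rw [hl, mk_eq_of_toList h]; rfl⟩)
      · exact h2 (by
          rw [PySem.Str.startswith_eq, PySem.Chars.startswith_iff]
          exact ⟨a, by rw [hl, mk_eq_of_toList h]; rfl⟩)
      · exact h3 (by
          rw [PySem.Str.startswith_eq, PySem.Chars.startswith_iff]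
          exact ⟨a, by rw [hl, mk_eq_of_toList h]; rfl⟩)
    · simp
      exact ⟨fun h => hc (by simp [h]), fun h => hc (by simp [h]), fun h => hc (by simp [h])⟩

-- ===== VERDICT (by name: the statement is the Claim_ definition above) =====
theorem parse_output_text_spec : Claim_equal_parse_output_text := by
  intro text _
  show parse_output_text text = parse_output_text_alt text
  unfold parse_output_text parse_output_text_alt
  apply foldl_ext
  intro items raw
  exact line_eq items (PySem.Str.strip raw)
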